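-- pv_equiv track=rewrite | github.com/mdhatmaker/Misc-python | interview-prep/geeks_for_geeks/string/reverse_words.py | my_reverse_split
-- ===== SOURCE A (Python) =====
-- def my_reverse_split(s, sep):
--     arr = []
--     i1 = len(s)-1
--     i2 = len(s)
--     while i1 >= -1:
--         if i1 < 0 or s[i1] == sep:
--             word = s[i1+1:i2]
--             arr.append(word)
--             i2 = i1
--         i1 -= 1
--     return arr
-- ===== SOURCE B (Python) =====
-- def my_reverse_split(s, sep):
--     arr = []
--     buf = []
--     for ch in s:
--         if ch == sep:
--             arr.append(''.join(buf))
--             buf = []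
--         else:
--             buf.append(ch)
--     arr.append(''.join(buf))
--     return arr[::-1]
-- ===== Notes on version B (the rewrite author's own statement) =====
-- stated objective: alternative
-- what changed: replaces A's right-to-left index/slice while-loop (absolute indices i1,i2 and s[i1+1:i2] slicing) with a single left-to-right character scan accumulating the current word in a buffer, then one final list reversal
import Mathlib
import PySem

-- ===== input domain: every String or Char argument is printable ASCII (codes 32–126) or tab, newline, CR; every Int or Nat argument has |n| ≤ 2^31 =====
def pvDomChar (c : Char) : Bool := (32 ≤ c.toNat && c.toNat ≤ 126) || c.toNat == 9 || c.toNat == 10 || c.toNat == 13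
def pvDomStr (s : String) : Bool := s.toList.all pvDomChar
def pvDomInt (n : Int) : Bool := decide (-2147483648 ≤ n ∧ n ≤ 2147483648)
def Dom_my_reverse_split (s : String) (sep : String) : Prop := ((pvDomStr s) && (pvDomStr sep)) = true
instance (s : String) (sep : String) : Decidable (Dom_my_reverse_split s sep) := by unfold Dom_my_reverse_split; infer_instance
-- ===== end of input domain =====

-- B replaces the right-to-left index/slice while-loop with a forward buffered scan + one reversal (alternative decomposition, same cost).

-- ===== PORT A =====
-- the while loop: fuel counts the remaining iterations (+1); i1, i2 as in the Python
def myA_loop (s : String) (sep : String) : Nat → Int → Int → List String → List String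
  | 0, _, _, arr => arr
  | Nat.succ k, i1, i2, arr =>
    if i1 ≥ -1 then
      if i1 < 0 || (PySem.Str.pyGet? s i1).any (fun c => String.ofList [c] == sep) then
        myA_loop s sep k (i1 - 1) i1 (arr ++ [PySem.Str.slice s (some (i1 + 1)) (some i2)])
      else
        myA_loop s sep k (i1 - 1) i2 arr
    else arr

def my_reverse_split (s : String) (sep : String) : List String :=
  myA_loop s sep (s.toList.length + 2) (PySem.Str.len s - 1) (PySem.Str.len s) []

-- ===== PORT B =====
def my_reverse_split_alt (s : String) (sep : String) : List String :=
  let fin := s.toList.foldl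
    (fun (st : List String × List Char) ch =>
      if String.ofList [ch] == sep then (st.1 ++ [String.ofList st.2], [])
      else (st.1, st.2 ++ [ch])) ([], [])
  (fin.1 ++ [String.ofList fin.2]).reverse

-- ===== PRECONDITION & SPEC =====
def Spec_my_reverse_split (s : String) (sep : String) (out : List String) : Prop := out = my_reverse_split_alt s sep
instance (s : String) (sep : String) (out : List String) : Decidable (Spec_my_reverse_split s sep out) := by unfold Spec_my_reverse_split; infer_instance

-- ===== CLAIM (what is proved, stated in full; the proofs are below) =====
def Claim_equal_my_reverse_split : Prop := ∀ (s : String) (sep : String), Dom_my_reverse_split s sep → Spec_my_reverse_split s sep (my_reverse_split s sep)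

-- ===== LEMMAS AND PROOFS =====

-- forward split: words of `buf ++ l` split at the characters matching sep (Python's 1-char comparison)
def gsplit (sep : String) : List Char → List Char → List (List Char)
  | buf, [] => [buf]
  | buf, c :: t => if String.ofList [c] == sep then buf :: gsplit sep [] t else gsplit sep (buf ++ [c]) t

-- backward split: rl is the reversed unscanned prefix, pend the chars already collected to its right
def hsplit (sep : String) : List Char → List Char → List (List Char)
  | pend, [] => [pend]
  | pend, c :: t => if String.ofList [c] == sep then pend :: hsplit sep [] t else hsplit sep (c :: pend) t

def mapLast (f : List Char → List Char) : List (List Char) → List (List Char)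
  | [] => []
  | [a] => [f a]
  | a :: b :: t => a :: mapLast f (b :: t)

theorem mapLast_snoc (f : List Char → List Char) (xs : List (List Char)) (a : List Char) :
    mapLast f (xs ++ [a]) = xs ++ [f a] := by
  induction xs with
  | nil => rfl
  | cons x xs ih =>
    cases xs with
    | nil => rfl
    | cons y ys => simpa [mapLast] using ih

theorem mapLast_cons_of_ne_nil (f : List Char → List Char) (a : List Char)
    (l : List (List Char)) (h : l ≠ []) : mapLast f (a :: l) = a :: mapLast f l := by
  cases l with
  | nil => exact absurd rfl h
  | cons b u => rfl

theorem mapLast_congr (f g : List Char → List Char) (l : List (List Char))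
    (h : ∀ x, f x = g x) : mapLast f l = mapLast g l := by
  induction l using List.reverseRecOn with
  | nil => rfl
  | append_singleton xs a _ => rw [mapLast_snoc, mapLast_snoc, h]

theorem mapLast_id (l : List (List Char)) : mapLast (fun x => x) l = l := by
  induction l using List.reverseRecOn with
  | nil => rfl
  | append_singleton xs a _ => rw [mapLast_snoc]

theorem mapLast_mapLast (f g : List Char → List Char) (l : List (List Char)) :
    mapLast f (mapLast g l) = mapLast (fun x => f (g x)) l := by
  induction l using List.reverseRecOn with
  | nil => rfl
  | append_singleton xs a _ => rw [mapLast_snoc, mapLast_snoc, mapLast_snoc]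

theorem gsplit_ne_nil (sep : String) (buf l : List Char) : gsplit sep buf l ≠ [] := by
  induction l generalizing buf with
  | nil => simp [gsplit]
  | cons c t ih =>
    by_cases h : String.ofList [c] == sep
    · simp [gsplit, h]
    · simp only [gsplit, h]; exact ih _

theorem gsplit_snoc (sep : String) (buf x : List Char) (c : Char) :
    gsplit sep buf (x ++ [c]) =
      if String.ofList [c] == sep then gsplit sep buf x ++ [[]]
      else mapLast (fun w => w ++ [c]) (gsplit sep buf x) := by
  induction x generalizing buf with
  | nil => by_cases h : String.ofList [c] == sep <;> simp [gsplit, h, mapLast]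
  | cons d t ih =>
    by_cases hd : String.ofList [d] == sep
    · by_cases h : String.ofList [c] == sep <;>
        simp [gsplit, hd, h, ih, mapLast_cons_of_ne_nil _ _ _ (gsplit_ne_nil sep [] t)]
    · by_cases h : String.ofList [c] == sep <;> simp [gsplit, hd, h, ih]

theorem hsplit_eq (sep : String) (rl pend : List Char) :
    hsplit sep pend rl = (mapLast (fun w => w ++ pend) (gsplit sep [] rl.reverse)).reverse := by
  induction rl generalizing pend with
  | nil => simp [hsplit, gsplit, mapLast]
  | cons c t ih =>
    by_cases h : String.ofList [c] == sep
    · have : gsplit sep [] ((c :: t).reverse) = gsplit sep [] t.reverse ++ [[]] := by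
        simp [List.reverse_cons, gsplit_snoc, h]
      rw [hsplit, if_pos h, ih, this, mapLast_snoc]
      have h2 : mapLast (fun w => w ++ ([] : List Char)) (gsplit sep [] t.reverse)
           = gsplit sep [] t.reverse := by
        rw [mapLast_congr _ (fun x => x) _ (by simp)]; exact mapLast_id _
      rw [h2, List.reverse_append]
      simp
    · have : gsplit sep [] ((c :: t).reverse)
           = mapLast (fun w => w ++ [c]) (gsplit sep [] t.reverse) := by
        simp [List.reverse_cons, gsplit_snoc, h]
      rw [hsplit, if_neg h, ih, this, mapLast_mapLast]
      exact congrArg List.reverse (mapLast_congr _ _ _ (fun x => by simp))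

-- B's foldl computes the forward split
theorem foldB (sep : String) (l : List Char) (arr : List String) (buf : List Char) :
    (l.foldl (fun (st : List String × List Char) ch =>
        if String.ofList [ch] == sep then (st.1 ++ [String.ofList st.2], [])
        else (st.1, st.2 ++ [ch])) (arr, buf)).1
      ++ [String.ofList ((l.foldl (fun (st : List String × List Char) ch =>
        if String.ofList [ch] == sep then (st.1 ++ [String.ofList st.2], [])
        else (st.1, st.2 ++ [ch])) (arr, buf)).2)]
    = arr ++ (gsplit sep buf l).map String.ofList := by
  induction l generalizing arr buf with
  | nil => simp [gsplit]
  | cons c t ih =>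
    simp only [List.foldl_cons, gsplit, beq_iff_eq] at *
    by_cases h : String.ofList [c] = sep
    · simp [h, ih]
    · simp [h, ih]

theorem alt_eq (s sep : String) :
    my_reverse_split_alt s sep = ((gsplit sep [] s.toList).map String.ofList).reverse := by
  unfold my_reverse_split_alt
  exact congrArg List.reverse (by simpa using foldB sep s.toList [] [])

-- A's loop invariant: i1 = n-1, the pending word is s[n:i2], the unscanned prefix is s[:n]
theorem loopA_eq (s sep : String) (n i2 : Nat) (arr : List String)
    (h1 : n ≤ i2) (h2 : i2 ≤ s.toList.length) :
    myA_loop s sep (n + 2) ((n : Int) - 1) (i2 : Int) arr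
      = arr ++ (hsplit sep (PySem.List.slice s.toList (some (n : Int)) (some (i2 : Int)))
          ((s.toList.take n).reverse)).map String.ofList := by
  induction n generalizing i2 arr with
  | zero =>
    show myA_loop s sep 2 (-1) (i2 : Int) arr = _
    rw [myA_loop]
    rw [if_pos (by omega), if_pos (by simp)]
    rw [myA_loop, if_neg (by omega)]
    simp [hsplit]
    rw [show PySem.Str.slice s (some 0) (some (i2 : Int))
          = String.ofList (PySem.List.slice s.toList (some 0) (some (i2 : Int))) from rfl,
        PySem.List.slice_toNat s.toList (le_refl 0) (Int.natCast_nonneg _)]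
    simp
  | succ n ih =>
    have hn : n < s.toList.length := by omega
    show myA_loop s sep (n + 3) (((n : Int) + 1) - 1) (i2 : Int) arr = _
    rw [myA_loop]
    rw [if_pos (by omega)]
    have htake : (s.toList.take (n + 1)).reverse = s.toList[n] :: (s.toList.take n).reverse := by
      rw [List.take_add_one]
      simp [List.getElem?_eq_getElem hn]
    have hget : PySem.Str.pyGet? s ((n : Int) + 1 - 1) = some s.toList[n] := by
      rw [show ((n : Int) + 1 - 1) = (n : Int) by ring, PySem.Str.pyGet?_eq]
      show PySem.List.pyGet? s.toList (n : Int) = _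
      rw [PySem.List.pyGet?_natCast, List.getElem?_eq_getElem hn]
    by_cases h : String.ofList [s.toList[n]] == sep
    · rw [if_pos (by rw [hget]; simp [h])]
      have : myA_loop s sep (n + 2) ((n : Int) + 1 - 1 - 1) ((n : Int) + 1 - 1)
          (arr ++ [PySem.Str.slice s (some ((n : Int) + 1 - 1 + 1)) (some (i2 : Int))])
        = myA_loop s sep (n + 2) ((n : Int) - 1) ((n : Int))
          (arr ++ [PySem.Str.slice s (some ((n + 1 : Nat) : Int)) (some (i2 : Int))]) := by
        norm_num
      rw [this, ih n _ (le_refl n) (by omega)]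
      have hslice_nn : PySem.List.slice s.toList (some (n : Int)) (some (n : Int)) = [] := by
        rw [PySem.List.slice_toNat s.toList (Int.natCast_nonneg _) (Int.natCast_nonneg _)]; simp
      rw [hslice_nn, htake, hsplit, if_pos h]
      simp
      rfl
    · rw [if_neg (by rw [hget]; simp [h])]
      have : myA_loop s sep (n + 2) ((n : Int) + 1 - 1 - 1) (i2 : Int) arr
           = myA_loop s sep (n + 2) ((n : Int) - 1) (i2 : Int) arr := by norm_num
      rw [this, ih i2 arr (by omega) h2]
      have hslice : PySem.List.slice s.toList (some ((n : Nat) : Int)) (some (i2 : Int))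
          = s.toList[n] :: PySem.List.slice s.toList (some ((n + 1 : Nat) : Int)) (some (i2 : Int)) := by
        rw [PySem.List.slice_toNat s.toList (Int.natCast_nonneg _) (Int.natCast_nonneg _),
            PySem.List.slice_toNat s.toList (Int.natCast_nonneg _) (Int.natCast_nonneg _)]
        simp only [Int.toNat_natCast]
        rw [show i2 - n = (i2 - (n + 1)) + 1 by omega, List.drop_eq_getElem_cons hn,
            List.take_succ_cons]
      rw [hslice, htake, hsplit, if_neg h]

-- ===== VERDICT (by name: the statement is the Claim_ definition above) =====
theorem my_reverse_split_spec : Claim_equal_my_reverse_split := by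
  intro s sep _
  unfold Spec_my_reverse_split my_reverse_split
  have hlen : PySem.Str.len s = (s.toList.length : Int) := by simp [pysem]
  rw [hlen]
  have := loopA_eq s sep s.toList.length s.toList.length [] (le_refl _) (le_refl _)
  rw [this]
  have hslice : PySem.List.slice s.toList (some (s.toList.length : Int)) (some (s.toList.length : Int)) = [] := by
    rw [PySem.List.slice_toNat s.toList (Int.natCast_nonneg _) (Int.natCast_nonneg _)]; simp
  rw [hslice, List.take_length, alt_eq, hsplit_eq]
  have : mapLast (fun w => w ++ ([] : List Char)) (gsplit sep [] s.toList.reverse.reverse)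
       = gsplit sep [] s.toList := by
    rw [mapLast_congr _ (fun x => x) _ (by simp), mapLast_id]; simp
  rw [this]
  simp [List.map_reverse]
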